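-- pv_equiv track=rewrite | github.com/TerrenceHenry/constraint-scanner | src/constraint_scanner/simulation/engine.py | _ordered_flags
-- ===== SOURCE A (Python) =====
-- def _ordered_flags(flags: list[str]) -> list[str]:
--     order = (
--         "invalid_opportunity_payload",
--         "missing_book",
--         "timing_mismatch",
--         "stale_quote",
--         "shallow_miss",
--         "partial_fill",
--         "leg_asymmetry",
--         "non_executable_depth",
--         "negative_expected_pnl",
--     )
--     seen = set(flags)
--     return [flag for flag in order if flag in seen]
-- ===== SOURCE B (Python) =====
-- def _ordered_flags(flags: list[str]) -> list[str]:
--     order = (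
--         "invalid_opportunity_payload",
--         "missing_book",
--         "timing_mismatch",
--         "stale_quote",
--         "shallow_miss",
--         "partial_fill",
--         "leg_asymmetry",
--         "non_executable_depth",
--         "negative_expected_pnl",
--     )
--     index = {flag: i for i, flag in enumerate(order)}
--     present = {flag for flag in flags if flag in index}
--     return sorted(present, key=index.__getitem__)
-- ===== Notes on version B (the rewrite author's own statement) =====
-- stated objective: alternative
-- what changed: B builds a flag-to-priority index dict, collects the set of input flags present in that dict, and sorts that set by index, instead of A's scan of the constant priority tuple with membership tests against set(flags).
import Mathlib
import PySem

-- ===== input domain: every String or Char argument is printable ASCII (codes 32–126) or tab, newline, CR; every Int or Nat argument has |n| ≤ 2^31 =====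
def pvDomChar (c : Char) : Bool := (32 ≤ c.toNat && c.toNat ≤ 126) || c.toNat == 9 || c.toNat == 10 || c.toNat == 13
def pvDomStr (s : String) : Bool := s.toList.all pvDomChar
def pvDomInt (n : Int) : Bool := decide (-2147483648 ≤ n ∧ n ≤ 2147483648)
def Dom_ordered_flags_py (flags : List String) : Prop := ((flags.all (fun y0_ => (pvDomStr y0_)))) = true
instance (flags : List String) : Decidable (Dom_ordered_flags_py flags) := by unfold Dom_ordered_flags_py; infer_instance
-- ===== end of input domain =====

-- B replaces A's scan of the constant priority tuple (membership tests against set(flags)) by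
-- building a flag→priority index dict, collecting the set of input flags known to the dict,
-- and sorting that set by index (objective: alternative decomposition, same cost).

-- ===== PORT A =====
def pvOrderA : List String :=
  ["invalid_opportunity_payload", "missing_book", "timing_mismatch", "stale_quote",
   "shallow_miss", "partial_fill", "leg_asymmetry", "non_executable_depth",
   "negative_expected_pnl"]

def ordered_flags_py (flags : List String) : List String :=
  let seen : PySem.Set String := PySem.Set.ofList flags
  pvOrderA.filter (fun flag => PySem.Set.contains seen flag)

-- ===== PORT B =====
def pvOrderB : List String :=
  ["invalid_opportunity_payload", "missing_book", "timing_mismatch", "stale_quote",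
   "shallow_miss", "partial_fill", "leg_asymmetry", "non_executable_depth",
   "negative_expected_pnl"]

-- index = {flag: i for i, flag in enumerate(order)}
def pvIndexB : PySem.Dict String Int :=
  PySem.Dict.ofList ((PySem.List.enumerate pvOrderB).map (fun p => (p.2, p.1)))

-- sorted(present, key=index.__getitem__): every element of present is a key of index,
-- so index[f] never raises; getD with default 0 is exact on those elements.
def ordered_flags_py_alt (flags : List String) : List String :=
  let present : PySem.Set String :=
    PySem.Set.ofList (flags.filter (fun f => pvIndexB.contains f))
  PySem.List.sorted present (fun f => pvIndexB.getD f 0) false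

-- ===== PRECONDITION & SPEC =====
def Spec_ordered_flags_py (flags : List String) (out : List String) : Prop := out = ordered_flags_py_alt flags
instance (flags : List String) (out : List String) : Decidable (Spec_ordered_flags_py flags out) := by unfold Spec_ordered_flags_py; infer_instance

-- ===== CLAIM (what is proved, stated in full; the proofs are below) =====
def Claim_equal_ordered_flags_py : Prop := ∀ (flags : List String), Dom_ordered_flags_py flags → Spec_ordered_flags_py flags (ordered_flags_py flags)

-- ===== LEMMAS AND PROOFS =====

-- the keys of B's index dict are exactly A's priority list, in order
theorem pv_keys_index : pvIndexB.keys = pvOrderA := by decide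

theorem pv_nodup_orderA : pvOrderA.Nodup := by decide

-- A's priority list is strictly increasing under B's sort key
theorem pv_pairwise_key :
    pvOrderA.Pairwise (fun a b => pvIndexB.getD a 0 < pvIndexB.getD b 0) := by decide

theorem pv_mem_filterA (flags : List String) (x : String) :
    x ∈ pvOrderA.filter (fun flag => PySem.Set.contains (PySem.Set.ofList flags) flag) ↔
      x ∈ pvOrderA ∧ x ∈ flags := by
  simp [List.mem_filter, PySem.Set.mem_ofList]

theorem pv_mem_presentB (flags : List String) (x : String) :
    x ∈ PySem.Set.ofList (flags.filter (fun f => pvIndexB.contains f)) ↔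
      x ∈ pvOrderA ∧ x ∈ flags := by
  rw [PySem.Set.mem_ofList, List.mem_filter]
  constructor
  · rintro ⟨hf, hc⟩
    refine ⟨?_, hf⟩
    have := (PySem.Dict.contains_iff_mem_keys (d := pvIndexB) (k := x)).mp hc
    rwa [pv_keys_index] at this
  · rintro ⟨ho, hf⟩
    refine ⟨hf, ?_⟩
    exact (PySem.Dict.contains_iff_mem_keys (d := pvIndexB) (k := x)).mpr
      (pv_keys_index ▸ ho)

-- ===== VERDICT (by name: the statement is the Claim_ definition above) =====
theorem ordered_flags_py_spec : Claim_equal_ordered_flags_py := by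
  intro flags _
  unfold Spec_ordered_flags_py ordered_flags_py ordered_flags_py_alt
  simp only []
  symm
  apply PySem.List.sorted_eq_of_perm_of_pairwise_lt
  · -- ys.Perm present
    refine (List.perm_ext_iff_of_nodup ?_ ?_).mpr ?_
    · exact pv_nodup_orderA.filter _
    · exact PySem.Set.nodup_ofList _
    · intro x
      rw [pv_mem_filterA, pv_mem_presentB]
  · exact pv_pairwise_key.filter _
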